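-- pv_equiv track=rewrite | github.com/petteriTeikari/deep-biblio-tools | src/converters/md_to_latex/latex_builder.py | _restore_unicode_symbols
-- ===== SOURCE A (Python) =====
-- def _restore_unicode_symbols(content: str) -> str:
--     """Restore Unicode symbols that were replaced with placeholders.
--
--     This is needed because pandoc converts Unicode math symbols to LaTeX math mode,
--     which conflicts with our currency dollar handling.
--     """
--     # Map placeholders back to appropriate LaTeX commands
--     # Using text mode commands to avoid math mode issues
--     replacements = {
--         "MULTIPLICATION_SIGN_PLACEHOLDER": r"$\times$",  # Keep this in math mode as it's standard
--         "PLUS_MINUS_PLACEHOLDER": r"\textpm{}",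
--         "GREATER_EQUAL_PLACEHOLDER": r"$\geq$",  # Keep in math mode
--         "LESS_EQUAL_PLACEHOLDER": r"$\leq$",  # Keep in math mode
--         "DEGREE_PLACEHOLDER": r"$^\circ$",  # Keep in math mode for degree symbol
--         "MICRO_PLACEHOLDER": r"$\mu$",  # Keep in math mode
--         "INFINITY_PLACEHOLDER": r"$\infty$",  # Keep in math mode
--         "APPROX_PLACEHOLDER": r"$\approx$",  # Keep in math mode
--         "DIVISION_PLACEHOLDER": r"$\div$",  # Keep in math mode
--         "NOT_EQUAL_PLACEHOLDER": r"$\neq$",  # Keep in math mode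
--     }
--
--     for placeholder, symbol in replacements.items():
--         content = content.replace(placeholder, symbol)
--
--     return content
-- ===== SOURCE B (Python) =====
-- def _restore_unicode_symbols(content: str) -> str:
--     """Restore Unicode symbols that were replaced with placeholders.
--
--     Single left-to-right scan: at each position, emit the replacement of the
--     placeholder that starts there (at most one can), else copy the character.
--     """
--     table = [
--         ("MULTIPLICATION_SIGN_PLACEHOLDER", r"$\times$"),
--         ("PLUS_MINUS_PLACEHOLDER", r"\textpm{}"),
--         ("GREATER_EQUAL_PLACEHOLDER", r"$\geq$"),
--         ("LESS_EQUAL_PLACEHOLDER", r"$\leq$"),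
--         ("DEGREE_PLACEHOLDER", r"$^\circ$"),
--         ("MICRO_PLACEHOLDER", r"$\mu$"),
--         ("INFINITY_PLACEHOLDER", r"$\infty$"),
--         ("APPROX_PLACEHOLDER", r"$\approx$"),
--         ("DIVISION_PLACEHOLDER", r"$\div$"),
--         ("NOT_EQUAL_PLACEHOLDER", r"$\neq$"),
--     ]
--     out = []
--     i = 0
--     n = len(content)
--     while i < n:
--         for placeholder, symbol in table:
--             if content.startswith(placeholder, i):
--                 out.append(symbol)
--                 i += len(placeholder)
--                 break
--         else:
--             out.append(content[i])
--             i += 1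
--     return "".join(out)
-- ===== Notes on version B (the rewrite author's own statement) =====
-- stated objective: alternative
-- what changed: Replaces A's ten sequential full replace passes with a single left-to-right scan over the characters that, at each position, dispatches on the one placeholder starting there (correct because no placeholder overlaps another and no replacement contains placeholder characters).
import Mathlib
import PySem

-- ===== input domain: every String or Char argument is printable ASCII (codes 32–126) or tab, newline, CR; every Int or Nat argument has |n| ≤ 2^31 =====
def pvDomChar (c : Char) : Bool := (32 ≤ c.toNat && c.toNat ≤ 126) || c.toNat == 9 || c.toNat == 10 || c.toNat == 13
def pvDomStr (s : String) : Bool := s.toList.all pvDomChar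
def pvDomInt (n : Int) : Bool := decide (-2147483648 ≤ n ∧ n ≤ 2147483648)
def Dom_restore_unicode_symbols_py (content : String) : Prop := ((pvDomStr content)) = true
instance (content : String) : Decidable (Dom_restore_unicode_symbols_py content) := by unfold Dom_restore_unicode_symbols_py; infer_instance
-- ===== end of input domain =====

-- B replaces A's ten sequential full str.replace passes with a single left-to-right
-- character scan dispatching on the placeholder found at each position (objective: alternative).

-- ===== PORT A =====
-- the replacements dict of A, as an association list in insertion order
def pvReplacementsA : List (String × String) :=
  [("MULTIPLICATION_SIGN_PLACEHOLDER", "$\\times$"),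
   ("PLUS_MINUS_PLACEHOLDER", "\\textpm{}"),
   ("GREATER_EQUAL_PLACEHOLDER", "$\\geq$"),
   ("LESS_EQUAL_PLACEHOLDER", "$\\leq$"),
   ("DEGREE_PLACEHOLDER", "$^\\circ$"),
   ("MICRO_PLACEHOLDER", "$\\mu$"),
   ("INFINITY_PLACEHOLDER", "$\\infty$"),
   ("APPROX_PLACEHOLDER", "$\\approx$"),
   ("DIVISION_PLACEHOLDER", "$\\div$"),
   ("NOT_EQUAL_PLACEHOLDER", "$\\neq$")]

def restore_unicode_symbols_py (content : String) : String :=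
  pvReplacementsA.foldl (fun c kv => PySem.Str.replace c kv.1 kv.2) content

-- ===== PORT B =====
-- Source B's table, on the character level at which B's scan works
def pvTableB : List (List Char × List Char) :=
[
  (['M', 'U', 'L', 'T', 'I', 'P', 'L', 'I', 'C', 'A', 'T', 'I', 'O', 'N', '_', 'S', 'I', 'G', 'N', '_', 'P', 'L', 'A', 'C', 'E', 'H', 'O', 'L', 'D', 'E', 'R'],
   ['$', '\\', 't', 'i', 'm', 'e', 's', '$']),
  (['P', 'L', 'U', 'S', '_', 'M', 'I', 'N', 'U', 'S', '_', 'P', 'L', 'A', 'C', 'E', 'H', 'O', 'L', 'D', 'E', 'R'],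
   ['\\', 't', 'e', 'x', 't', 'p', 'm', '{', '}']),
  (['G', 'R', 'E', 'A', 'T', 'E', 'R', '_', 'E', 'Q', 'U', 'A', 'L', '_', 'P', 'L', 'A', 'C', 'E', 'H', 'O', 'L', 'D', 'E', 'R'],
   ['$', '\\', 'g', 'e', 'q', '$']),
  (['L', 'E', 'S', 'S', '_', 'E', 'Q', 'U', 'A', 'L', '_', 'P', 'L', 'A', 'C', 'E', 'H', 'O', 'L', 'D', 'E', 'R'],
   ['$', '\\', 'l', 'e', 'q', '$']),
  (['D', 'E', 'G', 'R', 'E', 'E', '_', 'P', 'L', 'A', 'C', 'E', 'H', 'O', 'L', 'D', 'E', 'R'],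
   ['$', '^', '\\', 'c', 'i', 'r', 'c', '$']),
  (['M', 'I', 'C', 'R', 'O', '_', 'P', 'L', 'A', 'C', 'E', 'H', 'O', 'L', 'D', 'E', 'R'],
   ['$', '\\', 'm', 'u', '$']),
  (['I', 'N', 'F', 'I', 'N', 'I', 'T', 'Y', '_', 'P', 'L', 'A', 'C', 'E', 'H', 'O', 'L', 'D', 'E', 'R'],
   ['$', '\\', 'i', 'n', 'f', 't', 'y', '$']),
  (['A', 'P', 'P', 'R', 'O', 'X', '_', 'P', 'L', 'A', 'C', 'E', 'H', 'O', 'L', 'D', 'E', 'R'],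
   ['$', '\\', 'a', 'p', 'p', 'r', 'o', 'x', '$']),
  (['D', 'I', 'V', 'I', 'S', 'I', 'O', 'N', '_', 'P', 'L', 'A', 'C', 'E', 'H', 'O', 'L', 'D', 'E', 'R'],
   ['$', '\\', 'd', 'i', 'v', '$']),
  (['N', 'O', 'T', '_', 'E', 'Q', 'U', 'A', 'L', '_', 'P', 'L', 'A', 'C', 'E', 'H', 'O', 'L', 'D', 'E', 'R'],
   ['$', '\\', 'n', 'e', 'q', '$'])
]

-- Source B's inner for/else: first pair whose placeholder starts at the current position
def pvFind (s : List Char) : List (List Char × List Char) → Option (List Char × List Char)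
  | [] => none
  | kv :: rest => if kv.1.isPrefixOf s then some kv else pvFind s rest

theorem pvFind_some {s : List Char} {L : List (List Char × List Char)}
    {kv : List Char × List Char} (h : pvFind s L = some kv) : kv.1 <+: s ∧ kv ∈ L := by
  induction L with
  | nil => simp [pvFind] at h
  | cons a L ih =>
    by_cases ha : a.1.isPrefixOf s
    · simp [pvFind, ha] at h
      subst h
      exact ⟨List.isPrefixOf_iff_prefix.mp ha, List.mem_cons_self⟩
    · simp [pvFind, ha] at h
      rcases ih h with ⟨h1, h2⟩
      exact ⟨h1, List.mem_cons_of_mem _ h2⟩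

set_option maxRecDepth 8000 in
theorem pvTableB_keys_ne' : pvTableB.all (fun kv => !kv.1.isEmpty) = true := by decide

theorem pvTableB_keys_ne : ∀ kv ∈ pvTableB, kv.1 ≠ [] := by
  have h := pvTableB_keys_ne'
  simp only [List.all_eq_true, Bool.not_eq_true', List.isEmpty_eq_false_iff] at h
  exact h

-- Source B's while loop: emit the replacement of the placeholder matched here, else copy the char
def pvScan (s : List Char) : List Char :=
  match hf : pvFind s pvTableB with
  | some kv => kv.2 ++ pvScan (List.drop kv.1.length s)
  | none =>
    match s with
    | [] => []
    | c :: t => c :: pvScan t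
termination_by s.length
decreasing_by
  · rcases pvFind_some hf with ⟨hp, hm⟩
    have h1 : 0 < kv.1.length := List.length_pos_iff.mpr (pvTableB_keys_ne _ hm)
    have h2 : kv.1.length ≤ s.length := hp.length_le
    simp only [List.length_drop]
    omega
  · simp

def restore_unicode_symbols_py_alt (content : String) : String :=
  String.ofList (pvScan content.toList)

-- ===== PRECONDITION & SPEC =====
def Spec_restore_unicode_symbols_py (content : String) (out : String) : Prop := out = restore_unicode_symbols_py_alt content
instance (content : String) (out : String) : Decidable (Spec_restore_unicode_symbols_py content out) := by unfold Spec_restore_unicode_symbols_py; infer_instance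

-- ===== CLAIM (what is proved, stated in full; the proofs are below) =====
def Claim_equal_restore_unicode_symbols_py : Prop := ∀ (content : String), Dom_restore_unicode_symbols_py content → Spec_restore_unicode_symbols_py content (restore_unicode_symbols_py content)

-- ===== LEMMAS AND PROOFS =====

-- A's table, brought down to the character level, is B's table
set_option maxRecDepth 8000 in
theorem pvTables_agree :
    pvReplacementsA.map (fun kv => (kv.1.toList, kv.2.toList)) = pvTableB := by decide

-- clean structural form of Python's str.replace for a nonempty pattern
def pvRepl (old new : List Char) : List Char → List Char
  | [] => []
  | c :: t =>
    if old.isPrefixOf (c :: t) then new ++ pvRepl old new (List.drop (old.length - 1) t)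
    else c :: pvRepl old new t
termination_by s => s.length
decreasing_by
  · simp only [List.length_drop, List.length_cons]
    omega
  · simp

def pvFoldR (L : List (List Char × List Char)) (s : List Char) : List Char :=
  L.foldl (fun acc kv => pvRepl kv.1 kv.2 acc) s

theorem pvRepl_nil (old new : List Char) : pvRepl old new [] = [] := by
  rw [pvRepl]

theorem pvRepl_cons_pos (old new : List Char) (c : Char) (t : List Char)
    (h : old.isPrefixOf (c :: t) = true) :
    pvRepl old new (c :: t) = new ++ pvRepl old new (List.drop (old.length - 1) t) := by
  rw [pvRepl, if_pos h]

theorem pvRepl_cons_neg (old new : List Char) (c : Char) (t : List Char)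
    (h : ¬ old.isPrefixOf (c :: t) = true) :
    pvRepl old new (c :: t) = c :: pvRepl old new t := by
  rw [pvRepl, if_neg h]

-- PySem's replace agrees with pvRepl for a nonempty pattern
theorem pvGo_spec (old new : List Char) (ho : old ≠ []) :
    ∀ fuel l acc, l.length ≤ fuel →
      PySem.Chars.replace.go old new fuel l acc = acc.reverse ++ pvRepl old new l := by
  intro fuel
  induction fuel with
  | zero =>
    intro l acc hl
    have : l = [] := List.eq_nil_of_length_eq_zero (Nat.le_zero.mp hl)
    subst this
    simp [PySem.Chars.replace.go, pvRepl_nil]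
  | succ n ih =>
    intro l acc hl
    match l with
    | [] => simp [PySem.Chars.replace.go, pvRepl_nil]
    | c :: t =>
      by_cases hp : old.isPrefixOf (c :: t)
      · rw [PySem.Chars.replace.go, if_pos hp, pvRepl_cons_pos _ _ _ _ hp]
        have hlen : (List.drop old.length (c :: t)).length ≤ n := by
          have h1 : 0 < old.length := List.length_pos_iff.mpr ho
          simp only [List.length_drop, List.length_cons] at *
          omega
        rw [ih _ _ hlen]
        have hdrop : List.drop old.length (c :: t) = List.drop (old.length - 1) t := by
          match old, ho with
          | o :: olds, _ => simp
        rw [hdrop]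
        simp
      · rw [PySem.Chars.replace.go, if_neg hp, pvRepl_cons_neg _ _ _ _ hp]
        have hlen : t.length ≤ n := by simp at hl; omega
        rw [ih _ _ hlen]
        simp

theorem pvReplace_eq (old new s : List Char) (ho : old ≠ []) :
    PySem.Chars.replace s old new = pvRepl old new s := by
  unfold PySem.Chars.replace
  rw [if_neg (by simp [ho]), pvGo_spec old new ho s.length s [] le_rfl]
  simp

-- mismatch inside u rules out a match however the text continues
theorem pvSafe_no_prefix {old u : List Char} (h1 : ¬ old <+: u) (h2 : ¬ u <+: old)
    (t : List Char) : ¬ old <+: u ++ t := by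
  intro hp
  rcases List.prefix_or_prefix_of_prefix hp (List.prefix_append u t) with h | h
  · exact h1 h
  · exact h2 h

-- a word no pattern can match inside passes through replace unchanged
theorem pvRepl_pass (old new : List Char)
    (w : List Char) (h : ∀ p, p < w.length → ∀ t : List Char, ¬ old <+: (w.drop p ++ t)) :
    ∀ t, pvRepl old new (w ++ t) = w ++ pvRepl old new t := by
  induction w with
  | nil => intro t; rfl
  | cons c w ih =>
    intro t
    have h0 : ¬ old.isPrefixOf (c :: w ++ t) = true := by
      intro hp
      exact h 0 (by simp) t (by simpa using List.isPrefixOf_iff_prefix.mp hp)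
    rw [List.cons_append, pvRepl_cons_neg old new c (w ++ t) h0]
    rw [ih (fun p hp t => h (p + 1) (by simp; omega) t)]
    simp

theorem pvRepl_head_match (old new u : List Char) (ho : old ≠ []) :
    pvRepl old new (old ++ u) = new ++ pvRepl old new u := by
  match old, ho with
  | o :: olds, _ =>
    have hpre : (o :: olds).isPrefixOf (o :: (olds ++ u)) = true :=
      List.isPrefixOf_iff_prefix.mpr (by rw [← List.cons_append]; exact List.prefix_append _ _)
    rw [List.cons_append, pvRepl_cons_pos (o :: olds) new o (olds ++ u) hpre]
    have : List.drop ((o :: olds).length - 1) (olds ++ u) = u := by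
      simp
    rw [this]

-- characters of placeholders vs characters of replacements
def pvKeyAlpha (c : Char) : Bool := c.isUpper || c == '_'

set_option maxRecDepth 8000 in
theorem pvTableBW1' : pvTableB.all (fun kv => !kv.1.isEmpty && kv.1.all pvKeyAlpha &&
    !kv.2.isEmpty && kv.2.all (fun c => !pvKeyAlpha c)) = true := by decide

theorem pvTableBW1 : ∀ kv ∈ pvTableB, kv.1 ≠ [] ∧ (∀ c ∈ kv.1, pvKeyAlpha c = true) ∧
    kv.2 ≠ [] ∧ (∀ c ∈ kv.2, pvKeyAlpha c = false) := by
  have h := pvTableBW1'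
  simp only [List.all_eq_true, Bool.and_eq_true, Bool.not_eq_true',
    List.isEmpty_eq_false_iff] at h
  intro kv hkv
  rcases h kv hkv with ⟨⟨⟨h1, h2⟩, h3⟩, h4⟩
  exact ⟨h1, h2, h3, h4⟩

def pvSafeB (k u : List Char) : Bool := !(k.isPrefixOf u) && !(u.isPrefixOf k)

theorem pvSafeB_no_prefix {k u : List Char} (h : pvSafeB k u = true) (t : List Char) :
    ¬ k <+: u ++ t := by
  simp only [pvSafeB, Bool.and_eq_true, Bool.not_eq_true'] at h
  exact pvSafe_no_prefix (fun hp => by simp [List.isPrefixOf_iff_prefix.mpr hp] at h)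
    (fun hp => by simp [List.isPrefixOf_iff_prefix.mpr hp] at h) t

set_option maxRecDepth 8000 in
theorem pvTableBW2' : (pvTableB.all fun kvi => pvTableB.all fun kv =>
    (List.range kvi.1.length).all fun p =>
      (kv.1 == kvi.1 && p == 0) || pvSafeB kv.1 (kvi.1.drop p)) = true := by decide

theorem pvTableBW2 : ∀ kvi ∈ pvTableB, ∀ kv ∈ pvTableB, ∀ p < kvi.1.length,
    (kv.1 = kvi.1 ∧ p = 0) ∨ pvSafeB kv.1 (kvi.1.drop p) = true := by
  have h := pvTableBW2'
  simp only [List.all_eq_true, List.mem_range, Bool.or_eq_true, Bool.and_eq_true,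
    beq_iff_eq] at h
  exact h

set_option maxRecDepth 8000 in
theorem pvTableBW3' : (pvTableB.all fun kvv => pvTableB.all fun kv =>
    (List.range kvv.2.length).all fun p => pvSafeB kv.1 (kvv.2.drop p)) = true := by decide

theorem pvTableBW3 : ∀ kvv ∈ pvTableB, ∀ kv ∈ pvTableB, ∀ p < kvv.2.length,
    pvSafeB kv.1 (kvv.2.drop p) = true := by
  have h := pvTableBW3'
  simp only [List.all_eq_true, List.mem_range] at h
  exact h

set_option maxRecDepth 8000 in
theorem pvTableBNodup : (pvTableB.map Prod.fst).Nodup := by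
  show (pvTableB.map Prod.fst).Pairwise (fun a b => a ≠ b)
  decide

-- replacing cannot create a new placeholder occurrence at the front
theorem pvRepl_no_new_prefix (k' v' : List Char)
    (hv : v' ≠ []) (hvc : ∀ c ∈ v', pvKeyAlpha c = false) :
    ∀ s u, u ≠ [] → (∀ c ∈ u, pvKeyAlpha c = true) →
      u <+: pvRepl k' v' s → u <+: s := by
  intro s
  induction s with
  | nil => intro u hu _ hp; rw [pvRepl_nil] at hp; simp [List.prefix_nil] at hp; exact absurd hp hu
  | cons c t ih =>
    intro u hu hua hp
    by_cases hm : k'.isPrefixOf (c :: t)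
    · rw [pvRepl_cons_pos _ _ _ _ hm] at hp
      match u, hu, v', hv with
      | u0 :: u', _, w0 :: w', _ =>
        have : u0 = w0 := (List.cons_prefix_cons.mp hp).1
        have h1 : pvKeyAlpha u0 = true := hua u0 (by simp)
        have h2 : pvKeyAlpha w0 = false := hvc w0 (by simp)
        rw [this, h2] at h1
        exact absurd h1 (by simp)
    · rw [pvRepl_cons_neg _ _ _ _ hm] at hp
      match u, hu with
      | u0 :: u', _ =>
        rcases List.cons_prefix_cons.mp hp with ⟨rfl, hp'⟩
        match u' with
        | [] => simp [List.cons_prefix_cons]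
        | u1 :: u'' =>
          have := ih (u1 :: u'') (by simp) (fun c hc => hua c (by simp [hc])) hp'
          exact List.cons_prefix_cons.mpr ⟨rfl, this⟩

-- fold versions of the pass-through lemmas
theorem pvFoldR_nil (L : List (List Char × List Char)) : pvFoldR L [] = [] := by
  induction L with
  | nil => rfl
  | cons kv L ih => simp [pvFoldR, List.foldl_cons, pvRepl_nil] at *; exact ih

theorem pvFoldR_pass (L : List (List Char × List Char)) (w : List Char)
    (hL : ∀ kv ∈ L, ∀ p < w.length, pvSafeB kv.1 (w.drop p) = true) :
    ∀ t, pvFoldR L (w ++ t) = w ++ pvFoldR L t := by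
  induction L with
  | nil => intro t; rfl
  | cons kv L ih =>
    intro t
    have h1 : pvRepl kv.1 kv.2 (w ++ t) = w ++ pvRepl kv.1 kv.2 t :=
      pvRepl_pass _ _ w
        (fun p hp t' => pvSafeB_no_prefix (hL kv (by simp) p hp) t') t
    simp only [pvFoldR, List.foldl_cons] at *
    rw [h1, ih (fun kv' h' => hL kv' (by simp [h']))]

theorem pvFoldR_cons_of_no_match (L : List (List Char × List Char))
    (hLsub : ∀ kv ∈ L, kv ∈ pvTableB) :
    ∀ (c : Char) (cs : List Char), (∀ kv ∈ pvTableB, ¬ kv.1 <+: (c :: cs)) →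
      pvFoldR L (c :: cs) = c :: pvFoldR L cs := by
  induction L with
  | nil => intro c cs _; rfl
  | cons kv L ih =>
    intro c cs h
    have hkv : kv ∈ pvTableB := hLsub kv (by simp)
    have hstep : pvRepl kv.1 kv.2 (c :: cs) = c :: pvRepl kv.1 kv.2 cs :=
      pvRepl_cons_neg _ _ _ _
        (fun hp => h kv hkv (List.isPrefixOf_iff_prefix.mp hp))
    have hkeep : ∀ kv' ∈ pvTableB, ¬ kv'.1 <+: (c :: pvRepl kv.1 kv.2 cs) := by
      intro kv' hkv' hp
      rcases pvTableBW1 kv hkv with ⟨_, _, hv2, hv4⟩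
      rcases pvTableBW1 kv' hkv' with ⟨hk1, hk2, _, _⟩
      have := pvRepl_no_new_prefix kv.1 kv.2 hv2 hv4 (c :: cs) kv'.1 hk1 hk2
        (by rw [pvRepl_cons_neg _ _ _ _
              (fun hm => h kv hkv (List.isPrefixOf_iff_prefix.mp hm))]; exact hp)
      exact h kv' hkv' this
    simp only [pvFoldR, List.foldl_cons] at *
    rw [hstep, ih (fun kv' h' => hLsub kv' (by simp [h'])) c _ hkeep]

-- pvFind misses: no placeholder matches at the front
theorem pvFind_none {s : List Char} {L : List (List Char × List Char)}
    (h : pvFind s L = none) : ∀ kv ∈ L, ¬ kv.1 <+: s := by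
  induction L with
  | nil => simp
  | cons a L ih =>
    intro kv hkv
    by_cases ha : a.1.isPrefixOf s
    · simp [pvFind, ha] at h
    · simp [pvFind, ha] at h
      rcases List.mem_cons.mp hkv with rfl | hm
      · exact fun hp => ha (List.isPrefixOf_iff_prefix.mpr hp)
      · exact ih h kv hm

-- pvFind hits: the table splits at the first matching pair
theorem pvFind_split {s : List Char} {L : List (List Char × List Char)}
    {kv : List Char × List Char} (h : pvFind s L = some kv) :
    ∃ L1 L2, L = L1 ++ kv :: L2 := by
  induction L with
  | nil => simp [pvFind] at h
  | cons a L ih =>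
    by_cases ha : a.1.isPrefixOf s
    · simp [pvFind, ha] at h
      exact ⟨[], L, by simp [h]⟩
    · simp [pvFind, ha] at h
      rcases ih h with ⟨L1, L2, rfl⟩
      exact ⟨a :: L1, L2, rfl⟩

-- unfolding equations for the scan
theorem pvScan_some {s : List Char} {kv : List Char × List Char}
    (hf : pvFind s pvTableB = some kv) :
    pvScan s = kv.2 ++ pvScan (List.drop kv.1.length s) := by
  rw [pvScan]
  split
  · simp_all
  · simp_all

theorem pvScan_nil : pvScan [] = [] := by
  rw [pvScan]
  split
  · rename_i kv hf
    exact absurd (pvFind_some hf).1 (by simp [List.prefix_nil]; exact pvTableB_keys_ne _ (pvFind_some hf).2)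
  · rfl

theorem pvScan_none_cons {c : Char} {cs : List Char}
    (hf : pvFind (c :: cs) pvTableB = none) : pvScan (c :: cs) = c :: pvScan cs := by
  rw [pvScan]
  split
  · simp_all
  · rfl

-- the main invariant: the ten-pass chain equals the single scan
theorem pvMain : ∀ n (s : List Char), s.length ≤ n → pvFoldR pvTableB s = pvScan s := by
  intro n
  induction n with
  | zero =>
    intro s hs
    have : s = [] := List.eq_nil_of_length_eq_zero (Nat.le_zero.mp hs)
    subst this
    rw [pvScan_nil, pvFoldR_nil]
  | succ n ih =>
    intro s hs
    match hf : pvFind s pvTableB with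
    | some kv =>
      rcases pvFind_some hf with ⟨hp, hm⟩
      rcases pvTableBW1 kv hm with ⟨hk1, _, _, _⟩
      rcases pvFind_split hf with ⟨L1, L2, hsplit⟩
      rcases hp with ⟨t, rfl⟩
      have hL1 : ∀ x ∈ L1, x ∈ pvTableB := by
        intro x hx; rw [hsplit]; exact List.mem_append_left _ hx
      have hL2 : ∀ x ∈ L2, x ∈ pvTableB := by
        intro x hx; rw [hsplit]; exact List.mem_append_right _ (List.mem_cons_of_mem _ hx)
      have hne : ∀ x ∈ L1, x.1 ≠ kv.1 := by
        intro x hx heq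
        have := pvTableBNodup
        rw [hsplit] at this
        simp only [List.map_append, List.map_cons, List.nodup_append] at this
        exact this.2.2 x.1 (List.mem_map_of_mem hx) kv.1 (by simp) (by simp [heq])
      -- phase 1: the pairs before the match pass through the matched placeholder
      have hphase1 : ∀ u, pvFoldR L1 (kv.1 ++ u) = kv.1 ++ pvFoldR L1 u := by
        intro u
        refine pvFoldR_pass L1 kv.1 (fun x hx p hpl => ?_) u
        rcases pvTableBW2 kv hm x (hL1 x hx) p hpl with ⟨heq, _⟩ | hsafe
        · exact absurd heq (hne x hx)
        · exact hsafe
      -- phase 2: the pairs after the match pass through the inserted replacement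
      have hphase2 : ∀ u, pvFoldR L2 (kv.2 ++ u) = kv.2 ++ pvFoldR L2 u := by
        intro u
        exact pvFoldR_pass L2 kv.2
          (fun x hx p hpl => pvTableBW3 kv hm x (hL2 x hx) p hpl) u
      have hchain : pvFoldR pvTableB (kv.1 ++ t) = kv.2 ++ pvFoldR pvTableB t := by
        rw [hsplit]
        simp only [pvFoldR, List.foldl_append, List.foldl_cons]
        have e1 := hphase1 t
        simp only [pvFoldR] at e1
        rw [e1]
        have e2 := pvRepl_head_match kv.1 kv.2 (List.foldl (fun acc x => pvRepl x.1 x.2 acc) t L1) hk1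
        rw [e2]
        have e3 := hphase2 (pvRepl kv.1 kv.2 (List.foldl (fun acc x => pvRepl x.1 x.2 acc) t L1))
        simp only [pvFoldR] at e3
        rw [e3]
      rw [hchain]
      rw [pvScan_some hf]
      have hdrop : List.drop kv.1.length (kv.1 ++ t) = t := List.drop_left
      rw [hdrop]
      have hlt : t.length ≤ n := by
        have : 0 < kv.1.length := List.length_pos_iff.mpr hk1
        simp only [List.length_append] at hs
        omega
      rw [ih t hlt]
    | none =>
      match s with
      | [] =>
        rw [pvScan_nil, pvFoldR_nil]
      | c :: cs =>
        have h := pvFind_none hf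
        rw [pvFoldR_cons_of_no_match pvTableB (fun kv h => h) c cs h]
        rw [ih cs (by simp at hs; omega)]
        rw [pvScan_none_cons hf]

-- bridging the String-level fold of A down to the char-list fold
theorem pvStr_fold_toList (L : List (String × String)) :
    ∀ s : String,
      (L.foldl (fun c kv => PySem.Str.replace c kv.1 kv.2) s).toList =
        (L.map (fun kv => (kv.1.toList, kv.2.toList))).foldl
          (fun acc kv => PySem.Chars.replace acc kv.1 kv.2) s.toList := by
  induction L with
  | nil => intro s; rfl
  | cons kv L ih =>
    intro s
    simp only [List.foldl_cons, List.map_cons]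
    rw [ih]
    have : (PySem.Str.replace s kv.1 kv.2).toList =
        PySem.Chars.replace s.toList kv.1.toList kv.2.toList := by
      simp [PySem.Str.replace, String.toList_ofList]
    rw [this]

theorem pvChars_fold_eq_foldR (L : List (List Char × List Char))
    (hL : ∀ kv ∈ L, kv.1 ≠ []) :
    ∀ s, L.foldl (fun acc kv => PySem.Chars.replace acc kv.1 kv.2) s = pvFoldR L s := by
  induction L with
  | nil => intro s; rfl
  | cons kv L ih =>
    intro s
    simp only [List.foldl_cons, pvFoldR] at *
    rw [pvReplace_eq kv.1 kv.2 s (hL kv (by simp)),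
      ih (fun kv' h' => hL kv' (by simp [h']))]

theorem pvA_toList (content : String) :
    (restore_unicode_symbols_py content).toList = pvFoldR pvTableB content.toList := by
  unfold restore_unicode_symbols_py
  rw [pvStr_fold_toList, pvTables_agree]
  exact pvChars_fold_eq_foldR pvTableB pvTableB_keys_ne content.toList

-- ===== VERDICT =====
theorem restore_unicode_symbols_py_spec : Claim_equal_restore_unicode_symbols_py := by
  intro content _
  unfold Spec_restore_unicode_symbols_py restore_unicode_symbols_py_alt
  have h1 : (restore_unicode_symbols_py content).toList = pvScan content.toList := by
    rw [pvA_toList, pvMain content.toList.length content.toList le_rfl]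
  calc restore_unicode_symbols_py content
      = String.ofList ((restore_unicode_symbols_py content).toList) :=
        String.ofList_toList.symm
    _ = String.ofList (pvScan content.toList) := by rw [h1]
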